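-- pv_equiv track=rewrite | github.com/miliar/Code_Jam_Webscraper | solutions_python/Problem_200/3087.py | set_to_9
-- ===== SOURCE A (Python) =====
-- def set_to_9(digits, i):
--     if i > 0 and digits[i] == digits[i-1]:
--         set_to_9(digits, i-1)
--     else:
--         digits[i] -= 1
--         for j in range(i + 1, len(digits)):
--             digits[j] = 9
--     return digits
-- ===== SOURCE B (Python) =====
-- def set_to_9(digits, i):
--     # find the start of the run of equal digits ending at position i by a
--     # single forward scan, then rewrite the tail in one slice assignment
--     start = 0
--     for j in range(1, i + 1):
--         if digits[j] != digits[j - 1]: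
--             start = j
--     digits[start:] = [digits[start] - 1] + [9] * (len(digits) - start - 1)
--     return digits
-- ===== Notes on version B (the rewrite author's own statement) =====
-- stated objective: alternative
-- what changed: Replaces A's backward tail recursion and per-index 9-filling loop with a single forward scan that records the start of the last run of equal digits up to i, then rewrites the tail in one slice assignment (prefix + decremented digit + nines); Pre_ excludes negative in-range i, outside the solver's natural domain of digit positions (the initial call uses len-1 and the recursion only lowers it toward 0), where A's fill range(i+1, len) acts through negative-index wraparound and returns all nines, an unspecified corner.
-- outside the precondition, e.g. on set_to_9([3, 5, 5], -1): A returns [9, 9, 9], B returns [2, 9, 9]; on set_to_9([0, 1], -1): A returns [9, 9], B returns [-1, 9]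
import Mathlib
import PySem

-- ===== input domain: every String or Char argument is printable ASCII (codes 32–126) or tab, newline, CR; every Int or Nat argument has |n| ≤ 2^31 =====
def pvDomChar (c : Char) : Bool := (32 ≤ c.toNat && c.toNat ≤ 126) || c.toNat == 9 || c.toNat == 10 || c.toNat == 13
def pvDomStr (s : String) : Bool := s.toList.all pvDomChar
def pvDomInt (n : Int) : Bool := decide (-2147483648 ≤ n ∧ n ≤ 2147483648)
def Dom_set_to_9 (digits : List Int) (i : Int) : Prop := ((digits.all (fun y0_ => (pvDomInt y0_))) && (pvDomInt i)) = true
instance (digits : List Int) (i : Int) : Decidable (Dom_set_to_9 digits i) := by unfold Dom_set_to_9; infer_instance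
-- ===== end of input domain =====

-- B finds the run start by one forward scan and rewrites the tail with one slice assignment,
-- instead of A's backward recursion plus per-index fill loop (alternative decomposition, same cost).
-- Both Pythons mutate `digits` in place and return the same object; the equivalence proved here is about the return value.

-- ===== PORT A =====
-- A: if i > 0 and digits[i] == digits[i-1], recurse on i-1; else digits[i] -= 1 and set digits[j] = 9 for j in range(i+1, len(digits)).
def set_to_9 (digits : List Int) (i : Int) : List Int :=
  if h : 0 < i ∧ PySem.List.pyGet? digits i = PySem.List.pyGet? digits (i - 1) then
    set_to_9 digits (i - 1)
  else
    let d := PySem.List.pySetD digits i (PySem.List.pyGetD digits i 0 - 1)   -- digits[i] -= 1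
    (PySem.List.pyRange (i + 1) (d.length : Int) 1).foldl                    -- for j in range(i+1, len(digits)):
      (fun acc j => PySem.List.pySetD acc j 9) d                             --     digits[j] = 9
termination_by i.toNat
decreasing_by omega

-- ===== PORT B =====
-- B: start = last breakpoint ≤ i found by one forward scan; then digits[start:] = [digits[start]-1] + [9]*(len(digits)-start-1).
def set_to_9_alt (digits : List Int) (i : Int) : List Int :=
  let start := (PySem.List.pyRange 1 (i + 1) 1).foldl                        -- for j in range(1, i+1):
    (fun s j =>                                                              --   if digits[j] != digits[j-1]: start = j
      if PySem.List.pyGet? digits j ≠ PySem.List.pyGet? digits (j - 1) then j else s) 0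
  PySem.List.slice digits none (some start) ++                               -- digits[start:] = [digits[start]-1] + [9]*(len(digits)-start-1)
    (PySem.List.pyGetD digits start 0 - 1) ::
      List.replicate ((digits.length : Int) - start - 1).toNat 9

-- ===== PRECONDITION & SPEC =====
-- A raises IndexError when i is out of range; Pre_ additionally excludes negative in-range i, outside the solver's
-- natural domain of digit positions (the initial call uses len-1 and the recursion only lowers it toward 0), where A's
-- fill range(i+1, len) acts through negative-index wraparound and returns all nines, an unspecified corner.
def Pre_set_to_9 (digits : List Int) (i : Int) : Prop := 0 ≤ i ∧ i < (digits.length : Int)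
instance (digits : List Int) (i : Int) : Decidable (Pre_set_to_9 digits i) := by unfold Pre_set_to_9; infer_instance
def pvWitness_set_to_9 : List Int × Int := ([3, 2, 2], 2)

def Spec_set_to_9 (digits : List Int) (i : Int) (out : List Int) : Prop := out = set_to_9_alt digits i
instance (digits : List Int) (i : Int) (out : List Int) : Decidable (Spec_set_to_9 digits i out) := by unfold Spec_set_to_9; infer_instance

-- ===== CLAIM (what is proved, stated in full; the proofs are below) =====
def Claim_equal_set_to_9 : Prop := ∀ (digits : List Int) (i : Int), Dom_set_to_9 digits i → Pre_set_to_9 digits i → Spec_set_to_9 digits i (set_to_9 digits i)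

-- ===== LEMMAS AND PROOFS =====

-- the position A's recursion stops at: start of the maximal run of equal adjacent values ending at i
def runStart (digits : List Int) (i : Int) : Int :=
  if h : 0 < i ∧ PySem.List.pyGet? digits i = PySem.List.pyGet? digits (i - 1) then
    runStart digits (i - 1)
  else i
termination_by i.toNat
decreasing_by omega

theorem runStart_le (digits : List Int) (i : Int) : runStart digits i ≤ i := by
  by_cases h : 0 < i ∧ PySem.List.pyGet? digits i = PySem.List.pyGet? digits (i - 1)
  · rw [runStart, dif_pos h]
    have := runStart_le digits (i - 1)
    omega
  · rw [runStart, dif_neg h]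
termination_by i.toNat
decreasing_by omega

theorem runStart_nonneg (digits : List Int) (i : Int) (h0 : 0 ≤ i) : 0 ≤ runStart digits i := by
  by_cases h : 0 < i ∧ PySem.List.pyGet? digits i = PySem.List.pyGet? digits (i - 1)
  · rw [runStart, dif_pos h]
    exact runStart_nonneg digits (i - 1) (by omega)
  · rw [runStart, dif_neg h]
    exact h0
termination_by i.toNat
decreasing_by omega

-- A's recursion lands in its else-branch at runStart
theorem set_to_9_eq_at_runStart (digits : List Int) (i : Int) :
    set_to_9 digits i =
      (PySem.List.pyRange (runStart digits i + 1)
         ((PySem.List.pySetD digits (runStart digits i)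
            (PySem.List.pyGetD digits (runStart digits i) 0 - 1)).length : Int) 1).foldl
        (fun acc j => PySem.List.pySetD acc j 9)
        (PySem.List.pySetD digits (runStart digits i)
          (PySem.List.pyGetD digits (runStart digits i) 0 - 1)) := by
  by_cases h : 0 < i ∧ PySem.List.pyGet? digits i = PySem.List.pyGet? digits (i - 1)
  · have hr : runStart digits i = runStart digits (i - 1) := by rw [runStart, dif_pos h]
    rw [set_to_9, dif_pos h, set_to_9_eq_at_runStart digits (i - 1), hr]
  · have hr : runStart digits i = i := by rw [runStart, dif_neg h]
    rw [set_to_9, dif_neg h, hr]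
termination_by i.toNat
decreasing_by omega

-- the fill loop: from position m on, everything becomes 9
theorem fill_loop_eq (d : List Int) (m : Int) (h0 : 0 ≤ m) (h1 : m ≤ (d.length : Int)) :
    (PySem.List.pyRange m (d.length : Int) 1).foldl
      (fun acc j => PySem.List.pySetD acc j 9) d
    = d.take m.toNat ++ List.replicate (d.length - m.toNat) 9 := by
  by_cases hm : m < (d.length : Int)
  · have hk : m.toNat < d.length := by omega
    rw [PySem.List.pyRange_one_cons hm, List.foldl_cons,
        PySem.List.pySetD_of_nonneg d 9 h0]
    have hlen : ((d.set m.toNat 9).length : Int) = (d.length : Int) := by simp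
    have IH := fill_loop_eq (d.set m.toNat 9) (m + 1) (by omega) (by rw [hlen]; omega)
    rw [hlen] at IH
    rw [IH]
    have htake : (d.set m.toNat 9).take ((m + 1).toNat) = d.take m.toNat ++ [9] := by
      rw [List.set_eq_take_append_cons_drop, if_pos hk]
      have hl : (m + 1).toNat = (d.take m.toNat).length + 1 := by
        simp [List.length_take]
        omega
      rw [hl, List.take_append]
      simp
    rw [htake, List.append_assoc]
    congr 1
    have hn : d.length - m.toNat = (d.length - (m + 1).toNat) + 1 := by omega
    rw [hn, List.replicate_succ]
    simp
  · have hme : m = (d.length : Int) := le_antisymm h1 (not_lt.mp hm)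
    rw [hme, PySem.List.pyRange_one_eq_nil (le_refl _), List.foldl_nil]
    simp
termination_by (d.length - m.toNat)
decreasing_by simp only [List.length_set]; omega

-- B's forward scan computes runStart (for 0 ≤ i)
theorem scan_eq_runStart (digits : List Int) (i : Int) (h0 : 0 ≤ i) :
    (PySem.List.pyRange 1 (i + 1) 1).foldl
      (fun s j =>
        if PySem.List.pyGet? digits j ≠ PySem.List.pyGet? digits (j - 1) then j else s) 0
    = runStart digits i := by
  by_cases hi : 0 < i
  · rw [PySem.List.pyRange_one_succ_right (by omega : (1:Int) ≤ i), List.foldl_append,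
        List.foldl_cons, List.foldl_nil]
    by_cases he : PySem.List.pyGet? digits i = PySem.List.pyGet? digits (i - 1)
    · have IH := scan_eq_runStart digits (i - 1) (by omega)
      rw [show i - 1 + 1 = i from by omega] at IH
      have hr : runStart digits i = runStart digits (i - 1) := by
        rw [runStart, dif_pos ⟨hi, he⟩]
      rw [if_neg (by simpa using he), IH, hr]
    · rw [if_pos (by simpa using he), runStart, dif_neg (by tauto)]
  · have : i = 0 := by omega
    subst this
    rw [PySem.List.pyRange_one_eq_nil (by omega), List.foldl_nil, runStart,
        dif_neg (by simp)]
termination_by i.toNat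
decreasing_by omega

-- ===== VERDICT (by name: the statement is the Claim_ definition above) =====
theorem set_to_9_spec : Claim_equal_set_to_9 := by
  intro digits i _ hpre
  obtain ⟨hi, hlt⟩ := hpre
  have hk0 : 0 ≤ runStart digits i := runStart_nonneg digits i hi
  have hki : runStart digits i ≤ i := runStart_le digits i
  have hkn : (runStart digits i).toNat < digits.length := by omega
  unfold Spec_set_to_9
  rw [set_to_9_eq_at_runStart]
  have hs := scan_eq_runStart digits i hi
  simp only [set_to_9_alt, hs]
  rw [PySem.List.slice_to digits hk0]
  set k := runStart digits i with hkdef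
  set v := PySem.List.pyGetD digits k 0 - 1 with hvdef
  have hlen : ((PySem.List.pySetD digits k v).length : Int) = (digits.length : Int) := by
    rw [PySem.List.length_pySetD]
  rw [fill_loop_eq (PySem.List.pySetD digits k v) (k + 1) (by omega) (by rw [hlen]; omega)]
  rw [PySem.List.pySetD_of_nonneg digits v hk0]
  have htake : (digits.set k.toNat v).take ((k + 1).toNat) = digits.take k.toNat ++ [v] := by
    rw [List.set_eq_take_append_cons_drop, if_pos hkn]
    have hl : (k + 1).toNat = (digits.take k.toNat).length + 1 := by
      simp [List.length_take]
      omega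
    rw [hl, List.take_append]
    simp
  rw [List.length_set, htake, List.append_assoc]
  congr 2
  have hc : digits.length - (k + 1).toNat = ((digits.length : Int) - k - 1).toNat := by omega
  rw [hc]
  simp
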